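-- pv_equiv track=rewrite | github.com/Aasthaj01/DSA-questions | array/are_1s_k_length_apart.py | distance_between_one
-- ===== SOURCE A (Python) =====
-- def distance_between_one(nums, n, k):
--     if 1 in nums:
--             indx = nums.index(1)
--             count = 0
--             result = True
--             for i in range(indx+1, (len(nums))):
--                 if nums[i] == 0:
--                     count += 1
--                 elif nums[i] == 1:
--                     if count < k:
--                         result = False
--                     count = 0
--     else:
--         return True
--     return result
-- ===== SOURCE B (Python) =====
-- def distance_between_one(nums, n, k):
--     zpre = [0]
--     for x in nums:
--         zpre.append(zpre[-1] + (1 if x == 0 else 0))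
--     ones = [i for i, x in enumerate(nums) if x == 1]
--     return all(zpre[q] - zpre[p + 1] >= k for p, q in zip(ones, ones[1:]))
-- ===== Notes on version B (the rewrite author's own statement) =====
-- stated objective: alternative
-- what changed: B replaces A's single stateful scan (running zero-counter reset at each 1) by a zero-prefix-sum table plus the list of 1-indices, testing each consecutive pair of 1s via a prefix-sum difference.
import Mathlib
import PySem

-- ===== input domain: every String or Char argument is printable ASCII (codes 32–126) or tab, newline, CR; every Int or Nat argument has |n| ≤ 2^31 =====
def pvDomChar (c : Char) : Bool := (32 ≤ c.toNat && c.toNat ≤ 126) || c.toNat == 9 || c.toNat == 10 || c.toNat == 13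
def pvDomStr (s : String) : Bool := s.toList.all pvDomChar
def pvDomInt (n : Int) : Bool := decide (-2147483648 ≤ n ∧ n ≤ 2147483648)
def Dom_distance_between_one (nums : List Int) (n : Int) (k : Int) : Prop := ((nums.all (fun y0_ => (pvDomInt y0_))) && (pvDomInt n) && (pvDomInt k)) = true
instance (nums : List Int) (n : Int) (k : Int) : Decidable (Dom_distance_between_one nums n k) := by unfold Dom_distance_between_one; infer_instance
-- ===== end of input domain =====

-- B re-implements the check via a zero-prefix-sum table and the list of 1-indices
-- (pairwise gap test) instead of A's single stateful counter scan; objective: alternative decomposition.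

-- ===== PORT A =====
-- loop body of A's for-loop, as a helper: state is (count, result)
def stepA (k : Int) (s : Int × Bool) (v : Int) : Int × Bool :=
  if v == 0 then (s.1 + 1, s.2)
  else if v == 1 then (0, if s.1 < k then false else s.2)
  else s

def distance_between_one (nums : List Int) (n : Int) (k : Int) : Bool :=
  if (1 : Int) ∈ nums then
    match PySem.List.index? nums 1 with
    | none => true  -- unreachable: 1 ∈ nums
    | some indx =>
      let st := (PySem.List.pyRange ((indx : Int) + 1) (PySem.List.len nums) 1).foldl
        (fun s i => stepA k s (PySem.List.pyGetD nums i 0)) ((0 : Int), true)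
      st.2
  else
    true

-- ===== PORT B =====
def distance_between_one_alt (nums : List Int) (n : Int) (k : Int) : Bool :=
  let zpre : List Int := nums.foldl
    (fun acc x => acc ++ [PySem.List.pyGetD acc (-1) 0 + (if x == 0 then 1 else 0)]) [0]
  let ones : List Int := (PySem.List.enumerate nums 0).filterMap
    (fun p => if p.2 == 1 then some p.1 else none)
  (ones.zip (PySem.List.slice ones (some 1) none)).all
    (fun pq => decide (PySem.List.pyGetD zpre pq.2 0 - PySem.List.pyGetD zpre (pq.1 + 1) 0 ≥ k))

-- ===== PRECONDITION & SPEC =====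
def Spec_distance_between_one (nums : List Int) (n : Int) (k : Int) (out : Bool) : Prop := out = distance_between_one_alt nums n k
instance (nums : List Int) (n : Int) (k : Int) (out : Bool) : Decidable (Spec_distance_between_one nums n k out) := by unfold Spec_distance_between_one; infer_instance

-- ===== CLAIM (what is proved, stated in full; the proofs are below) =====
def Claim_equal_distance_between_one : Prop := ∀ (nums : List Int) (n : Int) (k : Int), Dom_distance_between_one nums n k → Spec_distance_between_one nums n k (distance_between_one nums n k)

-- ===== LEMMAS AND PROOFS =====

-- number of zeros in a list, as an Int
def zeros (l : List Int) : Int := (l.countP (fun x => x == 0) : Int)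

-- A's loop, structurally: c = zeros seen since the last 1
def go (k c : Int) : List Int → Bool
  | [] => true
  | x :: t => if x = 0 then go k (c + 1) t else if x = 1 then decide (k ≤ c) && go k 0 t else go k c t

-- indices (as Nats) of the 1s in a list
def onesN : List Int → List Nat
  | [] => []
  | x :: t => if x = 1 then 0 :: (onesN t).map (· + 1) else (onesN t).map (· + 1)

-- B's pairwise check, with the zeros between consecutive 1-positions made explicit
def chainC (k : Int) (l : List Int) : Nat → List Nat → Bool
  | _, [] => true
  | p, q :: t => decide (k ≤ zeros ((l.drop (p + 1)).take (q - (p + 1)))) && chainC k l q t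

-- running zero-counts appended by B's first loop
def partialSums (c : Int) : List Int → List Int
  | [] => []
  | x :: t => (c + (if x == 0 then 1 else 0)) :: partialSums (c + (if x == 0 then 1 else 0)) t

theorem fold_go (k : Int) (l : List Int) (c : Int) (r : Bool) :
    (l.foldl (stepA k) (c, r)).2 = (r && go k c l) := by
  induction l generalizing c r with
  | nil => simp [go]
  | cons x t ih =>
    by_cases h0 : x = 0
    · simp [stepA, go, h0, ih]
    · by_cases h1 : x = 1
      · simp only [List.foldl_cons, stepA, h1, go]
        rw [ih]
        by_cases hc : c < k
        · simp [hc, show ¬ k ≤ c by omega]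
        · simp [hc, show k ≤ c by omega]
      · simp [stepA, go, h0, h1, ih]

theorem zpre_foldl (l : List Int) (acc : List Int) (h : acc ≠ []) :
    l.foldl (fun acc x => acc ++ [PySem.List.pyGetD acc (-1) 0 + (if x == 0 then 1 else 0)]) acc
      = acc ++ partialSums (acc.getLast h) l := by
  induction l generalizing acc with
  | nil => simp [partialSums]
  | cons x t ih =>
    simp only [List.foldl_cons, partialSums]
    rw [PySem.List.pyGetD_neg_one acc 0 h, ih (acc ++ [acc.getLast h + (if x == 0 then 1 else 0)]) (by simp)]
    simp [partialSums]

theorem partialSums_getD (l : List Int) (c : Int) (j : Nat) (hj : j ≤ l.length) :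
    (c :: partialSums c l).getD j 0 = c + zeros (l.take j) := by
  induction l generalizing c j with
  | nil =>
    have : j = 0 := Nat.le_zero.mp hj
    subst this; simp [zeros]
  | cons x t ih =>
    cases j with
    | zero => simp [zeros]
    | succ j =>
      simp only [partialSums, List.getD_cons_succ]
      rw [ih _ j (by simpa using hj)]
      simp only [List.take_succ_cons, zeros, List.countP_cons]
      by_cases h0 : x = 0 <;> simp [h0] <;> push_cast <;> ring

theorem enum_ones (l : List Int) (s : Int) :
    (PySem.List.enumerate l s).filterMap (fun p => if p.2 == 1 then some p.1 else none)
      = (onesN l).map (fun j : Nat => s + (j : Int)) := by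
  induction l generalizing s with
  | nil => simp [PySem.List.enumerate_nil, onesN]
  | cons x t ih =>
    rw [PySem.List.enumerate_cons, List.filterMap_cons, ih (s + 1)]
    have hmm : ((onesN t).map (· + 1)).map (fun j : Nat => s + (j : Int))
        = (onesN t).map (fun j : Nat => (s + 1) + (j : Int)) := by
      rw [List.map_map]
      exact List.map_congr_left (fun a _ => by simp [Function.comp]; push_cast; ring)
    by_cases h1 : x = 1
    · have ho : onesN (x :: t) = 0 :: (onesN t).map (· + 1) := by simp [onesN, h1]
      have hc : (if (((s, x).2 == (1 : Int))) = true then some (s, x).1 else none) = some s := by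
        simp [h1]
      rw [ho, hc, List.map_cons, hmm]
      simp
    · have ho : onesN (x :: t) = (onesN t).map (· + 1) := by simp [onesN, h1]
      have hc : (if (((s, x).2 == (1 : Int))) = true then some (s, x).1 else none) = none := by
        simp [h1]
      rw [ho, hc, hmm]

theorem onesN_lt (l : List Int) : ∀ j ∈ onesN l, j < l.length := by
  induction l with
  | nil => simp [onesN]
  | cons x t ih =>
    intro j hj
    by_cases h1 : x = 1 <;> simp [onesN, h1] at hj
    · rcases hj with rfl | ⟨a, ha, rfl⟩
      · simp
      · have := ih a ha; simp only [List.length_cons]; omega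
    · rcases hj with ⟨a, ha, rfl⟩
      have := ih a ha; simp only [List.length_cons]; omega

theorem onesN_pairwise (l : List Int) : (onesN l).Pairwise (· < ·) := by
  induction l with
  | nil => simp [onesN]
  | cons x t ih =>
    have hmap : ((onesN t).map (· + 1)).Pairwise (· < ·) := by
      rw [List.pairwise_map]
      exact ih.imp (by omega)
    by_cases h1 : x = 1
    · have ho : onesN (x :: t) = 0 :: (onesN t).map (· + 1) := by simp [onesN, h1]
      rw [ho]
      refine List.pairwise_cons.2 ⟨?_, hmap⟩
      intro y hy
      rcases List.mem_map.1 hy with ⟨a, _, rfl⟩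
      omega
    · have ho : onesN (x :: t) = (onesN t).map (· + 1) := by simp [onesN, h1]
      rw [ho]
      exact hmap

theorem onesN_append_one (pre suf : List Int) (hpre : (1 : Int) ∉ pre) :
    onesN (pre ++ 1 :: suf) = pre.length :: (onesN suf).map (· + (pre.length + 1)) := by
  induction pre with
  | nil => simp [onesN]
  | cons x t ih =>
    have hx : x ≠ 1 := by intro h; exact hpre (by simp [h])
    have ht : (1 : Int) ∉ t := by intro h; exact hpre (by simp [h])
    simp only [List.cons_append, onesN, hx, ite_false, ih ht, List.map_cons,
      List.map_map, List.length_cons]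
    congr 1

theorem onesN_nil_of_not_mem (l : List Int) (h : (1 : Int) ∉ l) : onesN l = [] := by
  induction l with
  | nil => rfl
  | cons x t ih =>
    have hx : x ≠ 1 := by intro hh; exact h (by simp [hh])
    simp [onesN, hx, ih (fun hh => h (List.mem_cons_of_mem _ hh))]

-- the two characterizations agree: B's pairwise gap test equals A's stateful scan
theorem main_chain (k : Int) (nums : List Int) (suf : List Int) :
    ∀ (p : Nat) (mseg : List Int), (1 : Int) ∉ mseg → nums.drop (p + 1) = mseg ++ suf →
      chainC k nums p ((onesN suf).map (· + (p + 1 + mseg.length))) = go k (zeros mseg) suf := by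
  induction suf with
  | nil => intro p mseg _ _; simp [onesN, chainC, go]
  | cons x t ih =>
    intro p mseg hm hdrop
    by_cases h1 : x = 1
    · subst h1
      have ho : onesN ((1 : Int) :: t) = 0 :: (onesN t).map (· + 1) := by simp [onesN]
      rw [ho, List.map_cons, List.map_map]
      simp only [chainC]
      have hseg : (nums.drop (p + 1)).take (p + 1 + mseg.length - (p + 1)) = mseg := by
        rw [hdrop]; simp
      have hrec : chainC k nums (p + 1 + mseg.length)
          ((onesN t).map ((· + (p + 1 + mseg.length)) ∘ (· + 1)))
            = go k (zeros []) t := by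
        have h2 := ih (p + 1 + mseg.length) [] (by simp)
          (by rw [show p + 1 + mseg.length + 1 = (p + 1) + (mseg.length + 1) by omega,
                  ← List.drop_drop, hdrop]; simp)
        rw [← h2]
        congr 1
        exact List.map_congr_left (fun a _ => by simp [Function.comp]; omega)
      rw [show (0 : Nat) + (p + 1 + mseg.length) = p + 1 + mseg.length by omega] at *
      rw [hseg, hrec]
      simp only [go, if_pos rfl, if_neg (by omega : ¬ (1 : Int) = 0)]
      simp [zeros]
    · have hx1 : (1 : Int) ∉ mseg ++ [x] := by
        simp [hm]; omega
      have hdrop2 : nums.drop (p + 1) = (mseg ++ [x]) ++ t := by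
        rw [hdrop]; simp
      have h3 := ih p (mseg ++ [x]) hx1 hdrop2
      simp only [List.length_append, List.length_cons, List.length_nil] at h3
      have hmaps : ((onesN t).map (· + (p + 1 + (mseg.length + (0 + 1))))) =
          ((onesN (x :: t)).map (· + (p + 1 + mseg.length))) := by
        simp only [onesN, h1, if_neg, ite_false, List.map_map]
        exact (List.map_congr_left (fun a _ => by simp [Function.comp]; omega)).symm
      rw [hmaps] at h3
      rw [h3]
      have hz : zeros (mseg ++ [x]) = zeros mseg + (if x = 0 then 1 else 0) := by
        simp only [zeros, List.countP_append, List.countP_cons, List.countP_nil]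
        by_cases h0 : x = 0 <;> simp [h0]
      rw [hz]
      by_cases h0 : x = 0 <;> simp [go, h0, h1]

theorem zip_all_chain (k : Int) (nums : List Int) (zpre : List Int)
    (hz : ∀ (j : Nat), j ≤ nums.length → PySem.List.pyGetD zpre (j : Int) 0 = zeros (nums.take j)) :
    ∀ (qs : List Nat) (p : Nat), (∀ q ∈ p :: qs, q < nums.length) → (p :: qs).Pairwise (· < ·) →
      (((p :: qs).map (fun j : Nat => (j : Int))).zip (((p :: qs).map (fun j : Nat => (j : Int))).tail)).all
        (fun pq => decide (PySem.List.pyGetD zpre pq.2 0 - PySem.List.pyGetD zpre (pq.1 + 1) 0 ≥ k))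
        = chainC k nums p qs := by
  intro qs
  induction qs with
  | nil => intro p _ _; simp [chainC]
  | cons q t ihq =>
    intro p hlt hch
    have hpq : p < q := (List.pairwise_cons.1 hch).1 q (by simp)
    have hq : q < nums.length := hlt q (by simp)
    have hrec := ihq q (fun a ha => hlt a (List.mem_cons_of_mem _ ha)) (List.Pairwise.of_cons hch)
    simp only [List.map_cons, List.tail_cons, List.zip_cons_cons, List.all_cons] at hrec ⊢
    rw [hrec, show chainC k nums p (q :: t)
        = (decide (k ≤ zeros ((nums.drop (p + 1)).take (q - (p + 1)))) && chainC k nums q t) from rfl]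
    congr 1
    have h2 : PySem.List.pyGetD zpre ((q : Int)) 0 = zeros (nums.take q) := hz q (by omega)
    have h1 : PySem.List.pyGetD zpre ((p : Int) + 1) 0 = zeros (nums.take (p + 1)) := by
      rw [show ((p : Int) + 1) = (((p + 1 : Nat)) : Int) by push_cast; ring]
      exact hz (p + 1) (by omega)
    rw [h2, h1]
    have htake : nums.take q = nums.take (p + 1) ++ (nums.drop (p + 1)).take (q - (p + 1)) := by
      rw [← List.take_add]
      congr 1
      omega
    have hsum : zeros (nums.take q)
        = zeros (nums.take (p + 1)) + zeros ((nums.drop (p + 1)).take (q - (p + 1))) := by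
      rw [htake]; simp [zeros, List.countP_append]
    rw [hsum]
    simp only [decide_eq_decide]
    omega

-- ===== VERDICT (by name: the statement is the Claim_ definition above) =====
theorem distance_between_one_spec : Claim_equal_distance_between_one := by
  intro nums n k _
  unfold Spec_distance_between_one distance_between_one distance_between_one_alt
  have hzpre : nums.foldl
      (fun acc x => acc ++ [PySem.List.pyGetD acc (-1) 0 + (if x == 0 then 1 else 0)]) [(0 : Int)]
      = (0 : Int) :: partialSums 0 nums := by
    simpa using zpre_foldl nums [0] (by simp)
  have hz : ∀ (j : Nat), j ≤ nums.length →
      PySem.List.pyGetD ((0 : Int) :: partialSums 0 nums) (j : Int) 0 = zeros (nums.take j) := by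
    intro j hj
    rw [PySem.List.pyGetD_natCast, partialSums_getD nums 0 j hj]
    ring
  have hones : (PySem.List.enumerate nums 0).filterMap (fun p => if p.2 == 1 then some p.1 else none)
      = (onesN nums).map (fun j : Nat => (j : Int)) := by
    rw [enum_ones nums 0]
    exact List.map_congr_left (fun a _ => by simp)
  by_cases hmem : (1 : Int) ∈ nums
  · obtain ⟨indx, hidx⟩ := Option.isSome_iff_exists.1 ((PySem.List.index?_isSome_iff nums 1).2 hmem)
    obtain ⟨pre, suf, hnums, hlen, hnpre⟩ := (PySem.List.index?_eq_some_iff nums 1 indx).1 hidx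
    simp only [if_pos hmem, hidx, hzpre, hones, PySem.List.slice_from_one]
    -- A side: the range-foldl is the foldl over the suffix after the first 1
    rw [show PySem.List.len nums = (nums.length : Int) from PySem.List.len_eq nums]
    rw [PySem.List.foldl_pyRange_pyGetD' nums 0 (stepA k) ((0 : Int), true)
      (show (0 : Int) ≤ (indx : Int) + 1 by omega)]
    have hdrop : nums.drop ((indx : Int) + 1).toNat = suf := by
      rw [hnums, show ((indx : Int) + 1).toNat = pre.length + 1 by omega,
        show pre.length + 1 = pre.length + 1 by rfl]
      rw [List.drop_append]
      simp
    rw [hdrop, fold_go, Bool.true_and]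
    -- B side: the ones list splits at the first 1
    have honesN : onesN nums = indx :: (onesN suf).map (· + (indx + 1)) := by
      rw [hnums, onesN_append_one pre suf hnpre, hlen]
    rw [honesN]
    rw [zip_all_chain k nums ((0 : Int) :: partialSums 0 nums) hz
      ((onesN suf).map (· + (indx + 1))) indx
      (by
        intro q hq
        have : q ∈ onesN nums := by rw [honesN]; exact hq
        exact onesN_lt nums q this)
      (by
        have := onesN_pairwise nums
        rw [honesN] at this
        exact this)]
    have hdropN : nums.drop (indx + 1) = ([] : List Int) ++ suf := by
      rw [hnums, ← hlen, List.drop_append]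
      simp
    have hmain := main_chain k nums suf indx [] (by simp) hdropN
    simp only [List.length_nil, Nat.add_zero] at hmain
    rw [show zeros ([] : List Int) = 0 from by simp [zeros]] at hmain
    exact hmain.symm
  · simp only [if_neg hmem, hzpre, hones, onesN_nil_of_not_mem nums hmem, List.map_nil,
      PySem.List.slice_from_one, List.tail_nil, List.zip_nil_left, List.all_nil]
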